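-- pv_equiv track=rewrite | github.com/booydar/babilong | babilong/collect_results.py | parse_run_cfg
-- ===== SOURCE A (Python) =====
-- def parse_run_cfg(cfg_str):
--     parts = cfg_str.split('_')
--     result = {}
--     key_parts = []
--     for p in parts:
--         if p in ("yes", "no"):
--             key = "_".join(key_parts)
--             result[key] = (p == "yes")
--             key_parts = []
--         else:
--             key_parts.append(p)
--     return result
-- ===== SOURCE B (Python) =====
-- def parse_run_cfg(cfg_str):
--     def pairs(parts):
--         for i, p in enumerate(parts):
--             if p in ("yes", "no"):
--                 return [("_".join(parts[:i]), p == "yes")] + pairs(parts[i + 1:])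
--         return []
--     return dict(pairs(cfg_str.split('_')))
-- ===== Notes on version B (the rewrite author's own statement) =====
-- stated objective: alternative
-- what changed: A threads a dict plus a running key_parts accumulator through one fold; B recursively cuts the part list at the first 'yes'/'no' sentinel, builds the (key, value) pair list by 'join prefix, recurse on the tail', and feeds it to dict().
import Mathlib
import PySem

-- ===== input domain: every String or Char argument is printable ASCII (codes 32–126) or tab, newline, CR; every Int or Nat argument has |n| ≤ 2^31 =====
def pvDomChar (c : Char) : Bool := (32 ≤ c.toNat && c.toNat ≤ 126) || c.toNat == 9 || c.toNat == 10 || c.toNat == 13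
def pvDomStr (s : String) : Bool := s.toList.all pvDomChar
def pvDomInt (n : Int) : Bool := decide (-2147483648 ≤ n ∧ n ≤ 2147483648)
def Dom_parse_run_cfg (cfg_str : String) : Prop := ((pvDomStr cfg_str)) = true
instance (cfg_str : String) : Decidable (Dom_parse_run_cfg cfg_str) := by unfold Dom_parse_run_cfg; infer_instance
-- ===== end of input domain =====

-- B re-implements A by a recursive "cut at the first yes/no sentinel" decomposition
-- building the (key, value) pair list, then dict(pairs); objective: alternative
-- decomposition (recursion on the structure instead of a single accumulator loop).

-- ===== PORT A =====
def parse_run_cfg (cfg_str : String) : List (String × Bool) :=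
  let parts := (PySem.Str.split? cfg_str "_").getD []   -- sep = "_" ≠ "", so split? is always some
  let st := parts.foldl
    (fun (acc : PySem.Dict String Bool × List String) p =>
      if p == "yes" || p == "no" then
        (acc.1.insert (PySem.Str.join "_" acc.2) (p == "yes"), ([] : List String))
      else
        (acc.1, acc.2 ++ [p]))
    (PySem.Dict.empty, ([] : List String))
  st.1.items

-- ===== PORT B =====
-- helper 'pairs' of Source B: find the first sentinel (Python's enumerate+return IS findIdx?),
-- emit ('_'.join(parts[:i]), parts[i]=='yes') and recurse on parts[i+1:]
def pvPairs (parts : List String) : List (String × Bool) :=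
  match h : parts.findIdx? (fun p => p == "yes" || p == "no") with
  | none => []
  | some i =>
      (PySem.Str.join "_" (parts.take i), parts.getD i "" == "yes") :: pvPairs (parts.drop (i + 1))
termination_by parts.length
decreasing_by
  have := List.findIdx?_eq_some_iff_findIdx_eq.mp h
  simp [List.length_drop]; omega

def parse_run_cfg_alt (cfg_str : String) : List (String × Bool) :=
  (PySem.Dict.ofList (pvPairs ((PySem.Str.split? cfg_str "_").getD []))).items

-- ===== PRECONDITION & SPEC =====
def Spec_parse_run_cfg (cfg_str : String) (out : List (String × Bool)) : Prop := out = parse_run_cfg_alt cfg_str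
instance (cfg_str : String) (out : List (String × Bool)) : Decidable (Spec_parse_run_cfg cfg_str out) := by unfold Spec_parse_run_cfg; infer_instance

-- ===== CLAIM (what is proved, stated in full; the proofs are below) =====
def Claim_equal_parse_run_cfg : Prop := ∀ (cfg_str : String), Dom_parse_run_cfg cfg_str → Spec_parse_run_cfg cfg_str (parse_run_cfg cfg_str)

-- ===== LEMMAS AND PROOFS =====

-- A's loop body, named for the proofs
def pvStep (acc : PySem.Dict String Bool × List String) (p : String) :
    PySem.Dict String Bool × List String :=
  if p == "yes" || p == "no" then
    (acc.1.insert (PySem.Str.join "_" acc.2) (p == "yes"), ([] : List String))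
  else
    (acc.1, acc.2 ++ [p])

lemma pvFindIdx_append_cons (kp rest : List String) (p : String)
    (hkp : ∀ x ∈ kp, (x == "yes" || x == "no") = false)
    (hp : (p == "yes" || p == "no") = true) :
    (kp ++ p :: rest).findIdx? (fun q => q == "yes" || q == "no") = some kp.length := by
  induction kp with
  | nil => simp [List.findIdx?_cons, hp]
  | cons x xs ih =>
      have hx := hkp x (by simp)
      simp only [List.cons_append, List.findIdx?_cons, hx, Bool.false_eq_true, if_false,
        ih (fun y hy => hkp y (by simp [hy])), Option.map_some, List.length_cons]

lemma pvPairs_nil_of_fail (kp : List String)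
    (hkp : ∀ x ∈ kp, (x == "yes" || x == "no") = false) :
    pvPairs kp = [] := by
  have hn : kp.findIdx? (fun q => q == "yes" || q == "no") = none :=
    List.findIdx?_eq_none_iff.mpr hkp
  rw [pvPairs]
  split
  · rfl
  · rename_i i hsome; rw [hn] at hsome; cases hsome

lemma pvPairs_append_cons (kp rest : List String) (p : String)
    (hkp : ∀ x ∈ kp, (x == "yes" || x == "no") = false)
    (hp : (p == "yes" || p == "no") = true) :
    pvPairs (kp ++ p :: rest)
      = (PySem.Str.join "_" kp, p == "yes") :: pvPairs rest := by
  have h1 : (kp ++ p :: rest).take kp.length = kp := by simp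
  have h2 : (kp ++ p :: rest).getD kp.length "" = p := by simp [List.getD]
  have h3 : (kp ++ p :: rest).drop (kp.length + 1) = rest := by
    rw [show kp ++ p :: rest = (kp ++ [p]) ++ rest by simp,
        show kp.length + 1 = (kp ++ [p]).length by simp, List.drop_left]
  rw [pvPairs]
  split
  · rename_i hnone; rw [pvFindIdx_append_cons kp rest p hkp hp] at hnone; cases hnone
  · rename_i i hsome
    rw [pvFindIdx_append_cons kp rest p hkp hp] at hsome
    cases hsome
    rw [h1, h2, h3]

lemma pvMain (parts : List String) : ∀ (kp : List String) (d : PySem.Dict String Bool),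
    (∀ x ∈ kp, (x == "yes" || x == "no") = false) →
    (parts.foldl pvStep (d, kp)).1
      = (pvPairs (kp ++ parts)).foldl (fun d p => d.insert p.1 p.2) d := by
  induction parts with
  | nil =>
      intro kp d hkp
      simp [pvPairs_nil_of_fail kp hkp]
  | cons p rest ih =>
      intro kp d hkp
      by_cases hp : (p == "yes" || p == "no") = true
      · rw [pvPairs_append_cons kp rest p hkp hp]
        simp only [List.foldl_cons, pvStep, hp, if_true]
        exact ih [] _ (by simp)
      · have hp' : (p == "yes" || p == "no") = false := by
          revert hp; cases (p == "yes" || p == "no") <;> simp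
        simp only [List.foldl_cons, pvStep, hp', Bool.false_eq_true, if_false]
        have := ih (kp ++ [p]) d (by
          intro x hx
          rcases List.mem_append.mp hx with h | h
          · exact hkp x h
          · simp at h; subst h; exact hp')
        simpa [List.append_assoc] using this

-- ===== VERDICT (by name: the statement is the Claim_ definition above) =====
theorem parse_run_cfg_spec : Claim_equal_parse_run_cfg := by
  intro cfg_str _
  unfold Spec_parse_run_cfg parse_run_cfg parse_run_cfg_alt
  have h := pvMain ((PySem.Str.split? cfg_str "_").getD []) [] PySem.Dict.empty (by simp)
  simp only [List.nil_append] at h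
  rw [show (pvStep : PySem.Dict String Bool × List String → String → _)
      = (fun acc p => if p == "yes" || p == "no" then
          (acc.1.insert (PySem.Str.join "_" acc.2) (p == "yes"), ([] : List String))
        else (acc.1, acc.2 ++ [p])) from rfl] at h
  simp only [h]
  rfl
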